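-- pv_equiv track=rewrite | github.com/jozinzapletal/Python-CRISPR1-1-SEM-gene-drive-reverting | CRISPR1_1_model.py | generate_allele_combinations
-- ===== SOURCE A (Python) =====
-- def generate_allele_combinations(allele_list):
--
--     # create all the combinations of alleles possible
--     allele_1_sequence = []
--     allele_2_sequence = []
--
--     allele_dels = allele_list.copy()
--     for allele in allele_list:
--         for remaining_allele in allele_dels:
--             allele_1_sequence.append(allele)
--         allele_dels.remove(allele)
--
--     allele_dels = allele_list.copy()
--     for allele in allele_list:
--         for remaining_allele in allele_dels:
--             allele_2_sequence.append(remaining_allele)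
--         allele_dels.remove(allele)
--
--     # combine the two alleles together into a single genotype
--     two_allele_combinations = [i + j for i, j in zip(allele_1_sequence, allele_2_sequence)]
--
--     return two_allele_combinations
-- ===== SOURCE B (Python) =====
-- def generate_allele_combinations(allele_list):
--     # single nested pass over index pairs i <= j, emitting a+b directly
--     result = []
--     for i, a in enumerate(allele_list):
--         for b in allele_list[i:]:
--             result.append(a + b)
--     return result
-- ===== Notes on version B (the rewrite author's own statement) =====
-- stated objective: simpler
-- what changed: Replaces the three passes (two loops building parallel allele_1/allele_2 lists via a shrinking copy with destructive .remove(), then a zip+concat comprehension) with one nested loop over index pairs i<=j that appends allele_list[i]+allele_list[j] directly, maintaining only the result list.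
import Mathlib
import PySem

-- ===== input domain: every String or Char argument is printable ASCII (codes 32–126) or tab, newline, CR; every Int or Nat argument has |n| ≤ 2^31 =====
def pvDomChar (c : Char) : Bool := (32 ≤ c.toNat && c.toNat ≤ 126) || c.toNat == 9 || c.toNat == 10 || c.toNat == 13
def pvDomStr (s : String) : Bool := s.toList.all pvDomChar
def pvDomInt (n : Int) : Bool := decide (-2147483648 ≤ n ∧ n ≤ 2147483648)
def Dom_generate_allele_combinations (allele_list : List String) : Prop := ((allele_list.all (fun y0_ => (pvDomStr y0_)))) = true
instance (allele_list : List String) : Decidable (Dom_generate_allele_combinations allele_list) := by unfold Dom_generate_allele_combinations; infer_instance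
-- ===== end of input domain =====

-- B replaces A's two .remove()-driven passes plus zip/concat with one nested loop over index pairs (simpler decomposition).

-- ===== PORT A =====
-- A: build allele_1_sequence and allele_2_sequence by two passes over a shrinking
-- copy (allele_dels), then zip and concatenate.  .remove on a never-empty dels list
-- always succeeds in A; the `.getD []` only totalises the Option (never reached).
def generate_allele_combinations (allele_list : List String) : List String :=
  ((allele_list.foldl
      (fun (st : List String × List String) allele =>
        (st.1 ++ st.2.map (fun _ => allele), (PySem.List.remove? st.2 allele).getD []))
      ([], allele_list)).1.zip
   (allele_list.foldl
      (fun (st : List String × List String) allele =>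
        (st.1 ++ st.2, (PySem.List.remove? st.2 allele).getD []))
      ([], allele_list)).1).map (fun p => p.1 ++ p.2)

-- ===== PORT B =====
-- B: for i, a in enumerate(allele_list): for b in allele_list[i:]: result.append(a + b)
def generate_allele_combinations_alt (allele_list : List String) : List String :=
  (PySem.List.enumerate allele_list).foldl
    (fun (result : List String) (p : Int × String) =>
      result ++ (PySem.List.slice allele_list (some p.1) none).map (fun b => p.2 ++ b))
    []

-- ===== PRECONDITION & SPEC =====
def Spec_generate_allele_combinations (allele_list : List String) (out : List String) : Prop := out = generate_allele_combinations_alt allele_list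
instance (allele_list : List String) (out : List String) : Decidable (Spec_generate_allele_combinations allele_list out) := by unfold Spec_generate_allele_combinations; infer_instance

-- ===== CLAIM (what is proved, stated in full; the proofs are below) =====
def Claim_equal_generate_allele_combinations : Prop := ∀ (allele_list : List String), Dom_generate_allele_combinations allele_list → Spec_generate_allele_combinations allele_list (generate_allele_combinations allele_list)

-- ===== LEMMAS AND PROOFS =====

-- first-column sequence of A: each element repeated once per remaining element
def pvS1 : List String → List String
  | [] => []
  | x :: xs => (x :: xs).map (fun _ => x) ++ pvS1 xs

-- second-column sequence of A: successive tails
def pvS2 : List String → List String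
  | [] => []
  | x :: xs => (x :: xs) ++ pvS2 xs

-- the upper-triangular result both programs compute
def pvT : List String → List String
  | [] => []
  | x :: xs => (x :: xs).map (fun b => x ++ b) ++ pvT xs

theorem pv_fold1 (l : List String) : ∀ (acc : List String),
    (l.foldl
      (fun (st : List String × List String) allele =>
        (st.1 ++ st.2.map (fun _ => allele), (PySem.List.remove? st.2 allele).getD []))
      (acc, l)).1 = acc ++ pvS1 l := by
  induction l with
  | nil => intro acc; simp [pvS1]
  | cons x xs ih =>
    intro acc
    simp only [List.foldl_cons, PySem.List.remove?_cons_self, Option.getD_some]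
    rw [ih (acc ++ (x :: xs).map (fun _ => x))]
    simp [pvS1]

theorem pv_fold2 (l : List String) : ∀ (acc : List String),
    (l.foldl
      (fun (st : List String × List String) allele =>
        (st.1 ++ st.2, (PySem.List.remove? st.2 allele).getD []))
      (acc, l)).1 = acc ++ pvS2 l := by
  induction l with
  | nil => intro acc; simp [pvS2]
  | cons x xs ih =>
    intro acc
    simp only [List.foldl_cons, PySem.List.remove?_cons_self, Option.getD_some]
    rw [ih (acc ++ (x :: xs))]
    simp [pvS2]

theorem pv_zip_const (x : String) (ys : List String) :
    (((List.replicate ys.length x).zip ys).map (fun p => p.1 ++ p.2)) = ys.map (fun b => x ++ b) := by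
  induction ys with
  | nil => simp
  | cons y ys ih => simp [List.replicate_succ, ih]

theorem pv_zip_S1_S2 (l : List String) :
    ((pvS1 l).zip (pvS2 l)).map (fun p => p.1 ++ p.2) = pvT l := by
  induction l with
  | nil => simp [pvS1, pvS2, pvT]
  | cons x xs ih =>
    have hlen : (List.replicate (x :: xs).length x).length = (x :: xs).length := by simp
    simp only [pvS1, pvS2, pvT, List.map_const']
    rw [List.zip_append hlen, List.map_append, pv_zip_const, ih]

theorem pv_foldB (l : List String) : ∀ (xs : List String) (k : Nat) (acc : List String),
    l.drop k = xs →
    (PySem.List.enumerate xs (k : Int)).foldl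
      (fun (result : List String) (p : Int × String) =>
        result ++ (PySem.List.slice l (some p.1) none).map (fun b => p.2 ++ b))
      acc = acc ++ pvT xs := by
  intro xs
  induction xs with
  | nil => intro k acc _; simp [PySem.List.enumerate, pvT]
  | cons x xs ih =>
    intro k acc hdrop
    rw [PySem.List.enumerate_cons, List.foldl_cons]
    have hslice : PySem.List.slice l (some (k : Int)) none = l.drop k :=
      PySem.List.slice_from_natCast l k
    have hnext : l.drop (k + 1) = xs := by
      have h2 : (l.drop k).drop 1 = xs := by rw [hdrop]; rfl
      rwa [List.drop_drop] at h2
    have hcast : ((k : Int) + 1) = ((k + 1 : Nat) : Int) := by push_cast; ring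
    rw [hcast, ih (k + 1) _ hnext, hslice, hdrop]
    simp [pvT]

-- ===== VERDICT (by name: the statement is the Claim_ definition above) =====
theorem generate_allele_combinations_spec : Claim_equal_generate_allele_combinations := by
  intro l _
  show generate_allele_combinations l = generate_allele_combinations_alt l
  unfold generate_allele_combinations generate_allele_combinations_alt
  rw [show PySem.List.enumerate l = PySem.List.enumerate l ((0 : Nat) : Int) by norm_num]
  rw [pv_fold1 l [], pv_fold2 l [], pv_foldB l l 0 [] (by simp)]
  simpa using pv_zip_S1_S2 l
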